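-- pv_equiv track=rewrite | github.com/yang478/auditable-knowledge-packs | pack-builder/templates/kbtool_lib/tokenizer_core.py | extract_window
-- ===== SOURCE A (Python) =====
-- from typing import Dict, List, Sequence
--
-- def extract_window(text: str, terms: Sequence[str], max_chars: int) -> str:
--     if max_chars <= 0:
--         return ""
--     s = text
--     idx = -1
--     hit = ""
--     for t in terms:
--         if not t:
--             continue
--         j = s.find(t)
--         if j != -1 and (idx == -1 or j < idx):
--             idx = j
--             hit = t
--     if idx == -1:
--         return s[:max_chars]
--     start = max(0, idx - max_chars // 3)
--     end = min(len(s), start + max_chars)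
--     if end - start < max_chars:
--         start = max(0, end - max_chars)
--     snippet = s[start:end]
--     if start > 0:
--         snippet = "… " + snippet
--     if end < len(s):
--         snippet = snippet + " …"
--     return snippet
-- ===== SOURCE B (Python) =====
-- def extract_window(text, terms, max_chars):
--     if max_chars <= 0:
--         return ""
--     s = text
--     n = len(s)
--     idx = -1
--     for i in range(n):
--         if any(t and s.startswith(t, i) for t in terms):
--             idx = i
--             break
--     if idx == -1:
--         return s[:max_chars]
--     start = max(0, idx - max_chars // 3)
--     end = min(n, start + max_chars)
--     if end - start < max_chars:
--         start = max(0, end - max_chars)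
--     snippet = s[start:end]
--     if start > 0:
--         snippet = "… " + snippet
--     if end < n:
--         snippet = snippet + " …"
--     return snippet
-- ===== Notes on version B (the rewrite author's own statement) =====
-- stated objective: alternative
-- what changed: A finds the earliest hit by running s.find(t) once per term and keeping the minimum index; B makes a single left-to-right scan over text positions and stops at the first position where any term matches (text.startswith(t, i)), so the per-term find loops disappear.
import Mathlib
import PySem

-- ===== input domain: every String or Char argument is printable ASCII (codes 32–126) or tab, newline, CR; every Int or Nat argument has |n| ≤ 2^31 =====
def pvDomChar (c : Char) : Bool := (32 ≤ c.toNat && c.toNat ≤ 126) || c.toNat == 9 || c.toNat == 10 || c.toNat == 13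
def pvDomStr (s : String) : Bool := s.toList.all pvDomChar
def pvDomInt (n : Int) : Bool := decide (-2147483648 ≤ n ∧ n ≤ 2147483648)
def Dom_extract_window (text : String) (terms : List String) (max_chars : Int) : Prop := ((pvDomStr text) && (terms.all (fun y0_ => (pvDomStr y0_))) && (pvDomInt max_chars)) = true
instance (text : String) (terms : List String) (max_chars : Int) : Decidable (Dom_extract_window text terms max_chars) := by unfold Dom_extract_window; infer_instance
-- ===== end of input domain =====

-- B replaces A's per-term s.find loop by a single left-to-right scan of text positions that
-- stops at the first position where any term matches (objective: alternative, not measured faster).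

-- shared window formatting (the Python lines after the search are identical in Source A and Source B)
def pvWindow (s : List Char) (idx : Int) (max_chars : Int) : String :=
  let start := max 0 (idx - PySem.Int.floordiv max_chars 3)
  let e := min (s.length : Int) (start + max_chars)
  let start := if e - start < max_chars then max 0 (e - max_chars) else start
  let snippet := PySem.List.slice s (some start) (some e)
  let snippet := if 0 < start then "… ".toList ++ snippet else snippet
  let snippet := if e < (s.length : Int) then snippet ++ " …".toList else snippet
  String.ofList snippet

-- ===== PORT A =====
def awStep (s : List Char) (st : Int × String) (t : String) : Int × String :=
  if t = "" then st
  else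
    let j := PySem.Chars.find s t.toList
    if j ≠ -1 ∧ (st.1 = -1 ∨ j < st.1) then (j, t) else st

def extract_window (text : String) (terms : List String) (max_chars : Int) : String :=
  if max_chars ≤ 0 then "" else
  if (terms.foldl (awStep text.toList) (-1, "")).1 = -1 then
    String.ofList (PySem.List.slice text.toList none (some max_chars))
  else pvWindow text.toList (terms.foldl (awStep text.toList) (-1, "")).1 max_chars

-- ===== PORT B =====
def bwMatchAt (terms : List String) (l : List Char) : Bool :=
  terms.any (fun t => !(t == "") && PySem.Chars.startswith l t.toList)

def bwScan (terms : List String) : Nat → List Char → Option Nat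
  | _, [] => none
  | i, c :: rest => if bwMatchAt terms (c :: rest) then some i else bwScan terms (i+1) rest

def extract_window_alt (text : String) (terms : List String) (max_chars : Int) : String :=
  if max_chars ≤ 0 then "" else
  match bwScan terms 0 text.toList with
  | none => String.ofList (PySem.List.slice text.toList none (some max_chars))
  | some i => pvWindow text.toList (i : Int) max_chars

-- ===== PRECONDITION & SPEC =====
def Spec_extract_window (text : String) (terms : List String) (max_chars : Int) (out : String) : Prop := out = extract_window_alt text terms max_chars
instance (text : String) (terms : List String) (max_chars : Int) (out : String) : Decidable (Spec_extract_window text terms max_chars out) := by unfold Spec_extract_window; infer_instance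

-- ===== CLAIM (what is proved, stated in full; the proofs are below) =====
def Claim_equal_extract_window : Prop := ∀ (text : String) (terms : List String) (max_chars : Int), Dom_extract_window text terms max_chars → Spec_extract_window text terms max_chars (extract_window text terms max_chars)

-- ===== LEMMAS AND PROOFS =====

-- M: some nonempty term of `terms` matches at the head of `l`
def pvM (terms : List String) (l : List Char) : Prop :=
  ∃ t ∈ terms, t ≠ "" ∧ t.toList <+: l

lemma bwMatchAt_iff (terms : List String) (l : List Char) :
    bwMatchAt terms l = true ↔ pvM terms l := by
  simp [bwMatchAt, pvM, List.any_eq_true, PySem.Chars.startswith_iff]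

lemma pvM_nil_false (terms : List String) : ¬ pvM terms [] := by
  rintro ⟨t, _, hne, hp⟩
  have := List.prefix_nil.mp hp
  exact hne (by cases t; simp_all)

lemma bwScan_spec (terms : List String) (l : List Char) : ∀ i : Nat,
    (bwScan terms i l = none ∧ ∀ k, ¬ pvM terms (l.drop k)) ∨
    (∃ k, bwScan terms i l = some (i + k) ∧ pvM terms (l.drop k) ∧ ∀ m < k, ¬ pvM terms (l.drop m)) := by
  induction l with
  | nil => intro i; left; exact ⟨rfl, fun k => by simp [pvM_nil_false]⟩
  | cons c rest ih =>
    intro i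
    by_cases h : bwMatchAt terms (c :: rest) = true
    · right
      exact ⟨0, by simp [bwScan, h], (bwMatchAt_iff _ _).mp h, by omega⟩
    · have h' : ¬ pvM terms (c :: rest) := fun hm => h ((bwMatchAt_iff _ _).mpr hm)
      rcases ih (i + 1) with ⟨h1, h2⟩ | ⟨k, h1, h2, h3⟩
      · left
        refine ⟨by simp [bwScan, h, h1], fun k => ?_⟩
        cases k with
        | zero => simpa using h'
        | succ k => simpa using h2 k
      · right
        refine ⟨k + 1, ?_, by simpa using h2, ?_⟩
        · simp [bwScan, h]; rw [h1]; congr 1; omega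
        · intro m hm
          cases m with
          | zero => simpa using h'
          | succ m => simpa using h3 m (by omega)

-- A-side invariant for the fold over terms
def pvGoodA (s : List Char) (ts : List String) (v : Int) : Prop :=
  (v = -1 ∧ ∀ t ∈ ts, t ≠ "" → PySem.Chars.find s t.toList = -1) ∨
  ((∃ t ∈ ts, t ≠ "" ∧ PySem.Chars.find s t.toList = v) ∧ 0 ≤ v ∧
    ∀ t ∈ ts, t ≠ "" → PySem.Chars.find s t.toList ≠ -1 → v ≤ PySem.Chars.find s t.toList)

lemma foldA_good (s : List Char) (ts : List String) :
    pvGoodA s ts (ts.foldl (awStep s) (-1, "")).1 := by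
  induction ts using List.reverseRecOn with
  | nil => left; simp
  | append_singleton ts t ih =>
    rw [List.foldl_append]
    simp only [List.foldl_cons, List.foldl_nil]
    set st := ts.foldl (awStep s) (-1, "") with hst
    rcases ih with ⟨hv, hall⟩ | ⟨⟨t0, ht0, ht0ne, ht0f⟩, hv0, hmin⟩
    · by_cases hte : t = ""
      · left
        refine ⟨by simp [awStep, hte, hv], fun u hu hun => ?_⟩
        rcases List.mem_append.mp hu with h | h
        · exact hall u h hun
        · simp at h; subst h; exact absurd hte hun
      · by_cases hf : PySem.Chars.find s t.toList = -1
        · left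
          refine ⟨by simp [awStep, hte, hf, hv], fun u hu hun => ?_⟩
          rcases List.mem_append.mp hu with h | h
          · exact hall u h hun
          · simp at h; subst h; exact hf
        · right
          have hcond : PySem.Chars.find s t.toList ≠ -1 ∧ (st.1 = -1 ∨ PySem.Chars.find s t.toList < st.1) :=
            ⟨hf, Or.inl hv⟩
          have hstep : (awStep s st t).1 = PySem.Chars.find s t.toList := by
            simp [awStep, hte, hcond]
          have hge := PySem.Chars.neg_one_le_find s t.toList
          refine ⟨⟨t, by simp, hte, hstep.symm⟩, by omega, fun u hu hun huf => ?_⟩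
          rcases List.mem_append.mp hu with h | h
          · exact absurd (hall u h hun) huf
          · simp at h; subst h; omega
    · by_cases hte : t = ""
      · right
        have hstep : (awStep s st t).1 = st.1 := by simp [awStep, hte]
        refine ⟨⟨t0, by simp [ht0], ht0ne, by rw [hstep]; exact ht0f⟩, by rw [hstep]; exact hv0,
          fun u hu hun huf => ?_⟩
        rcases List.mem_append.mp hu with h | h
        · rw [hstep]; exact hmin u h hun huf
        · simp at h; subst h; exact absurd hte hun
      · by_cases hlt : PySem.Chars.find s t.toList ≠ -1 ∧ (st.1 = -1 ∨ PySem.Chars.find s t.toList < st.1)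
        · right
          have hstep : (awStep s st t).1 = PySem.Chars.find s t.toList := by
            simp [awStep, hte, hlt]
          have hge := PySem.Chars.neg_one_le_find s t.toList
          refine ⟨⟨t, by simp, hte, hstep.symm⟩, by omega, fun u hu hun huf => ?_⟩
          rcases List.mem_append.mp hu with h | h
          · have := hmin u h hun huf
            rw [hstep]; rcases hlt.2 with h' | h' <;> omega
          · simp at h; subst h; omega
        · right
          have hstep : (awStep s st t).1 = st.1 := by
            simp only [awStep, hte, if_false, if_neg hlt]
          refine ⟨⟨t0, by simp [ht0], ht0ne, by rw [hstep]; exact ht0f⟩, by rw [hstep]; exact hv0,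
            fun u hu hun huf => ?_⟩
          rcases List.mem_append.mp hu with h | h
          · rw [hstep]; exact hmin u h hun huf
          · simp at h; subst h
            rw [hstep]
            rcases (not_and_or.mp hlt) with h' | h'
            · exact absurd huf (by simpa using h')
            · rcases not_or.mp h' with ⟨h1, h2⟩
              omega

-- infix ↔ prefix at some position
lemma infix_iff_prefix_drop (p s : List Char) :
    p <:+: s ↔ ∃ j, p <+: s.drop j := by
  rw [← PySem.Chars.isIn_iff_infix, ← PySem.Chars.exists_prefix_drop_iff_isIn]

-- the two searches agree
lemma search_eq (s : List Char) (terms : List String) :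
    (terms.foldl (awStep s) (-1, "")).1 =
      (match bwScan terms 0 s with | none => (-1 : Int) | some i => (i : Int)) := by
  have hA := foldA_good s terms
  rcases bwScan_spec terms s 0 with ⟨hnone, hno⟩ | ⟨k, hsome, hk, hmin⟩
  · rw [hnone]
    rcases hA with ⟨hv, _⟩ | ⟨⟨t0, ht0, ht0ne, ht0f⟩, hv0, _⟩
    · exact hv
    · exfalso
      have hfind : 0 ≤ PySem.Chars.find s t0.toList := by omega
      have hpre := (PySem.Chars.find_spec hfind).1
      exact hno _ ⟨t0, ht0, ht0ne, hpre⟩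
  · rw [hsome]
    simp only [Nat.zero_add]
    rcases hA with ⟨_, hall⟩ | ⟨⟨t0, ht0, ht0ne, ht0f⟩, hv0, hminA⟩
    · exfalso
      obtain ⟨t, ht, htne, hp⟩ := hk
      have hinf : t.toList <:+: s := (infix_iff_prefix_drop _ _).mpr ⟨k, hp⟩
      exact (PySem.Chars.find_ne_neg_one_iff s t.toList).mpr hinf (hall t ht htne)
    · -- v := find s t0 = fold value; show v = k
      set v := PySem.Chars.find s t0.toList with hvdef
      have hspec := PySem.Chars.find_spec (show (0:Int) ≤ PySem.Chars.find s t0.toList by omega)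
      -- k ≤ v : t0 matches at v.toNat, so v.toNat not < k
      have hMv : pvM terms (s.drop v.toNat) := ⟨t0, ht0, ht0ne, hspec.1⟩
      have hkv : ¬ v.toNat < k := fun h => hmin _ h hMv
      -- v ≤ k : some term matches at k, its find ≤ k, and v ≤ its find
      obtain ⟨t, ht, htne, hp⟩ := hk
      have hinf : t.toList <:+: s := (infix_iff_prefix_drop _ _).mpr ⟨k, hp⟩
      have hfne : PySem.Chars.find s t.toList ≠ -1 :=
        (PySem.Chars.find_ne_neg_one_iff s t.toList).mpr hinf
      have hfge : 0 ≤ PySem.Chars.find s t.toList := by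
        have := PySem.Chars.neg_one_le_find s t.toList; omega
      have hft := PySem.Chars.find_spec hfge
      have hle : ¬ k < (PySem.Chars.find s t.toList).toNat := fun h => hft.2 k h hp
      have hvle := hminA t ht htne hfne
      omega

-- ===== VERDICT (by name: the statement is the Claim_ definition above) =====
theorem extract_window_spec : Claim_equal_extract_window := by
  intro text terms max_chars _
  unfold Spec_extract_window extract_window extract_window_alt
  by_cases hmc : max_chars ≤ 0
  · simp [hmc]
  · simp only [if_neg hmc]
    have h := search_eq text.toList terms
    cases hs : bwScan terms 0 text.toList with
    | none =>
      rw [hs] at h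
      simp only [if_pos h]
    | some i =>
      rw [hs] at h
      simp only [h]
      rw [if_neg (show ¬((i : Int) = -1) by intro hc; omega)]
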